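-- pv_equiv track=rewrite | github.com/Sioonn/CodingTest_Python | 프로그래머스/2/150369. 택배 배달과 수거하기/실패.py | update_lists
-- ===== SOURCE A (Python) =====
-- def update_lists(box_list,cap):
--     for i in range(len(box_list)):
--         if box_list[i] >= cap:
--             box_list[i] -= cap
--             return box_list
--         else:
--             cap -= box_list[i]
--             box_list[i] = 0
--     return [0]*len(box_list)
-- ===== SOURCE B (Python) =====
-- def update_lists(box_list, cap):
--     # Build the prefix-sum table, locate the split point, then construct the result.
--     prefs = []
--     s = 0
--     for x in box_list:
--         s += x
--         prefs.append(s)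
--     split = next((i for i, p in enumerate(prefs) if p >= cap), None)
--     if split is None:
--         box_list[:] = [0] * len(box_list)
--         return [0] * len(box_list)
--     box_list[:split] = [0] * split
--     box_list[split] = prefs[split] - cap
--     return box_list
-- ===== Notes on version B (the rewrite author's own statement) =====
-- stated objective: alternative
-- what changed: Replaces A's interleaved subtract-and-test loop (mutating cap) with a prefix-sum table plus a split-point search and direct construction of the result.
import Mathlib
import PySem

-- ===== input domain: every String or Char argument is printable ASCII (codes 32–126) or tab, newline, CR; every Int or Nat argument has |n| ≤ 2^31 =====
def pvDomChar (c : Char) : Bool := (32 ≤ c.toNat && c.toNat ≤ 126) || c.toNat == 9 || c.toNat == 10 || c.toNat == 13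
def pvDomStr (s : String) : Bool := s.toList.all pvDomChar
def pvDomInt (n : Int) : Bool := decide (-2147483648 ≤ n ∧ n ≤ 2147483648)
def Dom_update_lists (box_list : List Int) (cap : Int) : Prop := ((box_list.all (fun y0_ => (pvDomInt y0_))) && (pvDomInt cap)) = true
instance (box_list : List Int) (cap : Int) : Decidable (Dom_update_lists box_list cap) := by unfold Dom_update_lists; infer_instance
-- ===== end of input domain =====

-- B replaces A's interleaved subtract-and-test loop with a prefix-sum table, a split-point
-- search and direct construction (alternative decomposition, same cost). Both A and B mutate
-- box_list in place identically in Python; the theorems here are about the return value.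


-- ===== PORT A =====
-- the loop: 'some l' = early return with the (mutated) list, 'none' = fell through
def ulLoop (bs : List Int) (cap : Int) : Option (List Int) :=
  match bs with
  | [] => none
  | x :: xs =>
    if x ≥ cap then some ((x - cap) :: xs)
    else (ulLoop xs (cap - x)).map (fun l => 0 :: l)

def update_lists (box_list : List Int) (cap : Int) : List Int :=
  match ulLoop box_list cap with
  | some l => l
  | none => List.replicate box_list.length 0

-- ===== PORT B =====
-- first pass of Source B: running sum s, appending each prefix sum
def prefixSums (bs : List Int) (s : Int) : List Int :=
  match bs with
  | [] => []
  | x :: xs => (s + x) :: prefixSums xs (s + x)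

-- the 'next(...)/construct' part of Source B, over the prefix table
def altCore (bs : List Int) (prefs : List Int) (cap : Int) : List Int :=
  match prefs.findIdx? (fun p => p ≥ cap) with
  | none => List.replicate bs.length 0
  | some i => List.replicate i 0 ++ (prefs.getD i 0 - cap) :: bs.drop (i + 1)

def update_lists_alt (box_list : List Int) (cap : Int) : List Int :=
  altCore box_list (prefixSums box_list 0) cap

-- ===== PRECONDITION & SPEC =====
def Spec_update_lists (box_list : List Int) (cap : Int) (out : List Int) : Prop := out = update_lists_alt box_list cap
instance (box_list : List Int) (cap : Int) (out : List Int) : Decidable (Spec_update_lists box_list cap out) := by unfold Spec_update_lists; infer_instance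

-- ===== CLAIM (what is proved, stated in full; the proofs are below) =====
def Claim_equal_update_lists : Prop := ∀ (box_list : List Int) (cap : Int), Dom_update_lists box_list cap → Spec_update_lists box_list cap (update_lists box_list cap)

-- ===== LEMMAS AND PROOFS =====
lemma altCore_eq (bs : List Int) : ∀ (s cap : Int),
    altCore bs (prefixSums bs s) cap = update_lists bs (cap - s) := by
  induction bs with
  | nil =>
    intro s cap
    simp [altCore, prefixSums, update_lists, ulLoop, List.findIdx?, List.findIdx?.go]
  | cons x xs ih =>
    intro s cap
    by_cases h : s + x ≥ cap
    · have hx : x ≥ cap - s := by omega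
      simp [altCore, prefixSums, update_lists, ulLoop, List.findIdx?_cons, h, hx]
      omega
    · have hx : ¬ x ≥ cap - s := by omega
      have ihx := ih (s + x) cap
      have hc : cap - (s + x) = cap - s - x := by ring
      rw [hc] at ihx
      have rhs : update_lists (x :: xs) (cap - s) = 0 :: update_lists xs (cap - s - x) := by
        simp only [update_lists, ulLoop, hx, if_false]
        cases ulLoop xs (cap - s - x) <;> simp [List.replicate_succ]
      rw [rhs, ← ihx]
      simp only [prefixSums, altCore, List.findIdx?_cons, decide_eq_true_eq, h, if_false]
      cases hfi : (prefixSums xs (s + x)).findIdx? (fun p => p ≥ cap) with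
      | none => simp [List.replicate_succ]
      | some j =>
        simp [List.replicate_succ, List.drop_succ_cons]

-- ===== VERDICT (by name: the statement is the Claim_ definition above) =====
theorem update_lists_spec : Claim_equal_update_lists := by
  intro bs cap _
  unfold Spec_update_lists update_lists_alt
  have h := altCore_eq bs 0 cap
  simpa using h.symm
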